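-- pv_equiv track=rewrite | github.com/pyraxal/AutoRsr-NoBert | auto_rsr.py | score_rsr
-- ===== SOURCE A (Python) =====
-- def score_rsr(a_list):
--     """
--     Convert error counts into a raw RSR score.
--
--     Assigns:
--       - 2 points if zero errors,
--       - 1 point if fewer than 4 errors,
--       - 0 points otherwise.
--
--     Args:
--         a_list (List[int]): List of error counts to score.
--
--     Returns:
--         int: Sum of points across all items.
--     """
--     sum = 0
--     for element in a_list:
--         if element == 0:
--             sum+=2
--         elif element < 4:
--             sum+=1
--     return sum
-- ===== SOURCE B (Python) =====
-- def score_rsr(a_list):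
--     zeros = sum(1 for e in a_list if e == 0)
--     few = sum(1 for e in a_list if e < 4)
--     return zeros + few
-- ===== Notes on version B (the rewrite author's own statement) =====
-- stated objective: simpler
-- what changed: Replaces the single if/elif accumulator loop by two independent counts (elements equal to 0, elements below 4) whose sum equals the score, since a zero is counted in both.
import Mathlib
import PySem

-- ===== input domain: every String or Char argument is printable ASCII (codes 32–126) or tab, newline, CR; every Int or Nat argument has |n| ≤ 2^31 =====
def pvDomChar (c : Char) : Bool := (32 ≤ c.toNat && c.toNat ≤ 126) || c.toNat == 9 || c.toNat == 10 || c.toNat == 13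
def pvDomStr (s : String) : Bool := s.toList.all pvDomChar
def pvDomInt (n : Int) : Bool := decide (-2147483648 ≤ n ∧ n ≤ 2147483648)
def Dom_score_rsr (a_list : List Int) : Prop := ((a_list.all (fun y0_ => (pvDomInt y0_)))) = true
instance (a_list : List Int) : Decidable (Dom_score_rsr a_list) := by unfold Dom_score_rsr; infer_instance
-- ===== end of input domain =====

-- B replaces A's if/elif accumulator loop by two independent counts (zeros and elements < 4) added together; objective: simpler.

-- ===== PORT A =====
def score_rsr (a_list : List Int) : Int :=
  a_list.foldl (fun sum element =>
    if element == 0 then sum + 2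
    else if element < 4 then sum + 1
    else sum) 0

-- ===== PORT B =====
def score_rsr_alt (a_list : List Int) : Int :=
  (a_list.countP (fun e => e == 0) : Int) + (a_list.countP (fun e => e < 4) : Int)

-- ===== PRECONDITION & SPEC =====
def Spec_score_rsr (a_list : List Int) (out : Int) : Prop := out = score_rsr_alt a_list
instance (a_list : List Int) (out : Int) : Decidable (Spec_score_rsr a_list out) := by unfold Spec_score_rsr; infer_instance

-- ===== CLAIM (what is proved, stated in full; the proofs are below) =====
def Claim_equal_score_rsr : Prop := ∀ (a_list : List Int), Dom_score_rsr a_list → Spec_score_rsr a_list (score_rsr a_list)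

-- ===== LEMMAS AND PROOFS =====
theorem score_rsr_foldl_shift (a_list : List Int) (s : Int) :
    a_list.foldl (fun sum element =>
      if element == 0 then sum + 2
      else if element < 4 then sum + 1
      else sum) s = s + score_rsr_alt a_list := by
  induction a_list generalizing s with
  | nil => simp [score_rsr_alt]
  | cons h t ih =>
    simp only [List.foldl_cons, score_rsr_alt, List.countP_cons]
    rw [ih]
    by_cases h0 : h = 0
    · simp [h0, score_rsr_alt]; ring
    · by_cases h4 : h < 4 <;>
        simp [h0, h4, score_rsr_alt]; ring

-- ===== VERDICT (by name: the statement is the Claim_ definition above) =====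
theorem score_rsr_spec : Claim_equal_score_rsr := by
  intro a_list _
  unfold Spec_score_rsr score_rsr
  rw [score_rsr_foldl_shift]
  ring
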